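-- pv_equiv track=rewrite | github.com/adobe-research/speaker-identification | joint_iterators.py | get_coref_types
-- ===== SOURCE A (Python) =====
-- import itertools
-- from collections import Counter, namedtuple, defaultdict
--
-- def get_coref_types(entities):
--     entity_num = len(entities)
--     labels = [['O'] * entity_num for _ in range(entity_num)]
--     clusters = defaultdict(list)
--     for i, entity in enumerate(entities):
--         entity_id = entity['entity_id']
--         cluster_id = entity_id[:entity_id.rfind('-')]
--         clusters[cluster_id].append(i)
--     for _, entities in clusters.items():
--         for i, j in itertools.combinations(entities, 2):
--             labels[i][j] = 'COREF'
--             labels[j][i] = 'COREF'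
--     return labels
-- ===== SOURCE B (Python) =====
-- def get_coref_types(entities):
--     cids = []
--     for entity in entities:
--         eid = entity['entity_id']
--         cids.append(eid[:eid.rfind('-')])
--     n = len(cids)
--     return [['COREF' if i != j and cids[i] == cids[j] else 'O' for j in range(n)]
--             for i in range(n)]
-- ===== Notes on version B (the rewrite author's own statement) =====
-- stated objective: simpler
-- what changed: B drops the cluster index (defaultdict + per-group combinations) entirely: it computes each entity's cluster id once into a flat list and fills the matrix with one direct all-pairs comparison (i != j and cids[i] == cids[j]).
import Mathlib
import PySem

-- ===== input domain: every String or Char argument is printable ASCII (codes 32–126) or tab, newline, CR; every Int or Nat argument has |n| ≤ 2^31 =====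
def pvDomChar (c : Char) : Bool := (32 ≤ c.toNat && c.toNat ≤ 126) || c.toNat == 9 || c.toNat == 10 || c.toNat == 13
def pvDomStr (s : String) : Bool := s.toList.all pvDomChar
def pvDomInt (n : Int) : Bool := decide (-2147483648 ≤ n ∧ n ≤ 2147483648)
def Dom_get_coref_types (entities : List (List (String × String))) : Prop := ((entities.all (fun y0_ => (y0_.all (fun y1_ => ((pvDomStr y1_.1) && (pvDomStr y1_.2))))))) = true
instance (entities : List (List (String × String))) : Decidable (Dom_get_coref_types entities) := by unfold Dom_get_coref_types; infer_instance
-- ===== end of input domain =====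

-- B replaces A's defaultdict cluster index + per-group itertools.combinations marking by a flat
-- list of cluster ids and a single all-pairs comparison (simpler; same O(n^2) cost).

-- ===== PORT A =====
-- cluster_id = entity_id[:entity_id.rfind('-')]  (entity['entity_id'] is the assoc-list lookup;
-- the "" default is unreachable under Pre_, which demands the key be present)
def pvCidA (e : List (String × String)) : String :=
  let eid := PySem.Dict.getD (PySem.Dict.mk e) "entity_id" ""
  PySem.Str.slice eid none (some (PySem.Str.rfind eid "-"))

-- labels[i][j] = v (indices always in range when A runs it)
def pvSet2 (m : List (List String)) (i j : Int) (v : String) : List (List String) :=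
  m.set i.toNat ((m.getD i.toNat []).set j.toNat v)

def pvMark (lbs : List (List String)) (c : List Int) : List (List String) :=
  match c with
  | [i, j] => pvSet2 (pvSet2 lbs i j "COREF") j i "COREF"
  | _ => lbs

def get_coref_types (entities : List (List (String × String))) : List (List String) :=
  let entity_num := entities.length
  let labels := List.replicate entity_num (List.replicate entity_num "O")
  let clusters : PySem.Dict String (List Int) :=
    (PySem.List.enumerate entities 0).foldl
      (fun d p => d.modify (pvCidA p.2) [] (· ++ [p.1])) PySem.Dict.empty
  clusters.items.foldl
    (fun lbs kg => (PySem.List.combinations kg.2 2).foldl pvMark lbs) labels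

-- ===== PORT B =====
def pvCidB (e : List (String × String)) : String :=
  let eid := PySem.Dict.getD (PySem.Dict.mk e) "entity_id" ""
  PySem.Str.slice eid none (some (PySem.Str.rfind eid "-"))

def get_coref_types_alt (entities : List (List (String × String))) : List (List String) :=
  let cids := entities.map pvCidB
  let n : Int := PySem.List.len cids
  (PySem.List.pyRange 0 n 1).map (fun i =>
    (PySem.List.pyRange 0 n 1).map (fun j =>
      if i ≠ j ∧ PySem.List.pyGetD cids i "" = PySem.List.pyGetD cids j "" then "COREF" else "O"))

-- ===== PRECONDITION & SPEC =====
-- Pre_ excludes exactly the inputs where some entity lacks the key 'entity_id' (Python A raises KeyError there).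
def Pre_get_coref_types (entities : List (List (String × String))) : Prop :=
  (entities.all (fun e => e.any (fun p => p.1 == "entity_id"))) = true
instance (entities : List (List (String × String))) : Decidable (Pre_get_coref_types entities) := by unfold Pre_get_coref_types; infer_instance
def pvWitness_get_coref_types : (List (List (String × String))) :=
  [[("entity_id", "a-1")], [("entity_id", "a-2")], [("entity_id", "b-1")]]

def Spec_get_coref_types (entities : List (List (String × String))) (out : List (List String)) : Prop := out = get_coref_types_alt entities
instance (entities : List (List (String × String))) (out : List (List String)) : Decidable (Spec_get_coref_types entities out) := by unfold Spec_get_coref_types; infer_instance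

-- ===== CLAIM (what is proved, stated in full; the proofs are below) =====
def Claim_equal_get_coref_types : Prop := ∀ (entities : List (List (String × String))), Dom_get_coref_types entities → Pre_get_coref_types entities → Spec_get_coref_types entities (get_coref_types entities)

-- ===== LEMMAS AND PROOFS =====

theorem pvCidB_eq_pvCidA : pvCidB = pvCidA := rfl

-- the canonical n×n matrix both ports compute: COREF exactly at distinct same-cluster pairs
def pvSpecM (cids : List String) : List (List String) :=
  (List.range cids.length).map (fun a => (List.range cids.length).map (fun b =>
    if a ≠ b ∧ cids[a]? = cids[b]? then "COREF" else "O"))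

-- entry accessor
def pvGet2 (m : List (List String)) (a b : Nat) : String :=
  ((m[a]?.getD [])[b]?).getD ""

-- shape invariant
def pvShape (m : List (List String)) (n : Nat) : Prop :=
  m.length = n ∧ ∀ r ∈ m, r.length = n



def pvGroup (entities : List (List (String × String))) (c : String) : List Int :=
  ((PySem.List.enumerate entities 0).filter (fun p => pvCidA p.2 == c)).map (·.1)
def pvKeys (entities : List (List (String × String))) : List String :=
  PySem.Set.ofList ((PySem.List.enumerate entities 0).map (fun p => pvCidA p.2))
def pvPL (entities : List (List (String × String))) : List (List Int) :=
  (pvKeys entities).flatMap (fun c => PySem.List.combinations (pvGroup entities c) 2)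

theorem foldl_flatMap' {α β γ : Type} (l : List α) (g : α → List β) (f : γ → β → γ) (init : γ) :
    (l.flatMap g).foldl f init = l.foldl (fun acc x => (g x).foldl f acc) init := by
  induction l generalizing init with
  | nil => rfl
  | cons h t ih => simp [List.flatMap_cons, List.foldl_append, ih]

theorem A_eq_fold (entities : List (List (String × String))) :
    get_coref_types entities =
      (pvPL entities).foldl pvMark
        (List.replicate entities.length (List.replicate entities.length "O")) := by
  show ((PySem.List.enumerate entities 0).foldl
      (fun d p => d.modify (pvCidA p.2) [] (· ++ [p.1])) PySem.Dict.empty).items.foldl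
      (fun lbs kg => (PySem.List.combinations kg.2 2).foldl pvMark lbs)
      (List.replicate entities.length (List.replicate entities.length "O")) = _
  have hnd : ((PySem.List.enumerate entities 0).foldl
      (fun d p => d.modify (pvCidA p.2) [] (· ++ [p.1])) PySem.Dict.empty).keys.Nodup := by
    apply PySem.Dict.nodup_keys_foldl_modify_key
    exact PySem.Dict.nodup_keys_empty
  rw [PySem.Dict.items_eq_map_keys _ hnd []]
  have hkeys : ((PySem.List.enumerate entities 0).foldl
      (fun d p => d.modify (pvCidA p.2) [] (· ++ [p.1])) PySem.Dict.empty).keys = pvKeys entities := by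
    rw [PySem.Dict.keys_foldl_modify_key]
    simp [pvKeys, PySem.Set.update_nil_left, PySem.Dict.keys_empty]
  have hgetD : ∀ c, ((PySem.List.enumerate entities 0).foldl
      (fun d p => d.modify (pvCidA p.2) [] (· ++ [p.1])) PySem.Dict.empty).getD c [] = pvGroup entities c := by
    intro c
    rw [show ((PySem.List.enumerate entities 0).foldl
      (fun d p => d.modify (pvCidA p.2) [] (· ++ [p.1])) PySem.Dict.empty)
      = (((PySem.List.enumerate entities 0).map (fun p => (pvCidA p.2, p.1))).foldl
          (fun d q => d.modify q.1 [] (· ++ [q.2])) PySem.Dict.empty) from by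
        rw [List.foldl_map]]
    rw [PySem.Dict.getD_foldl_modify_append]
    simp [pvGroup, List.filter_map, List.map_map, Function.comp_def, PySem.Dict.getD_empty]
  rw [hkeys, List.foldl_map, pvPL, foldl_flatMap']
  congr 1
  funext lbs c
  rw [hgetD]

abbrev pvHitP (PL : List (List Int)) (a b : Nat) : Prop :=
  (PL.any (fun l => l == [(a:Int),(b:Int)] || l == [(b:Int),(a:Int)])) = true

theorem pvHitP_iff (PL : List (List Int)) (a b : Nat) :
    pvHitP PL a b ↔ ∃ l ∈ PL, l = [(a:Int),(b:Int)] ∨ l = [(b:Int),(a:Int)] := by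
  simp [pvHitP]

theorem pvShape_set2 {m : List (List String)} {n : Nat} (hs : pvShape m n)
    (i j : Nat) (hi : i < n) (hj : j < n) (v : String) :
    pvShape (pvSet2 m (i:Int) (j:Int) v) n := by
  obtain ⟨hl, hr⟩ := hs
  constructor
  · simp [pvSet2, hl]
  · intro r hrm
    simp only [pvSet2, Int.toNat_natCast] at hrm
    rcases List.mem_or_eq_of_mem_set hrm with h | h
    · exact hr r h
    · subst h
      have him : i < m.length := by omega
      rw [List.getD_eq_getElem?_getD, List.getElem?_eq_getElem him]
      simp only [Option.getD_some, List.length_set]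
      exact hr _ (List.getElem_mem him)

theorem pvGet2_set2 {m : List (List String)} {n : Nat} (hs : pvShape m n)
    (i j : Nat) (hi : i < n) (hj : j < n) (v : String) (a b : Nat) :
    pvGet2 (pvSet2 m (i:Int) (j:Int) v) a b
      = if a = i ∧ b = j then v else pvGet2 m a b := by
  obtain ⟨hl, hr⟩ := hs
  have him : i < m.length := by omega
  have hrowlen : (m[i]?.getD []).length = n := by
    rw [List.getElem?_eq_getElem him]
    exact hr _ (List.getElem_mem him)
  have hrowlen2 : m[i].length = n := hr _ (List.getElem_mem him)
  by_cases hai : a = i <;> by_cases hbj : b = j <;>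
    simp [pvSet2, pvGet2, Int.toNat_natCast, List.getD_eq_getElem?_getD, List.getElem?_set,
      him, hrowlen, hrowlen2, hj, hai, hbj, Ne.symm]

theorem pvShape_mark {m : List (List String)} {n : Nat} (hs : pvShape m n)
    {l : List Int} (hl : ∃ i j : Nat, l = [(i:Int),(j:Int)] ∧ i < n ∧ j < n) :
    pvShape (pvMark m l) n := by
  obtain ⟨i, j, rfl, hi, hj⟩ := hl
  exact pvShape_set2 (pvShape_set2 hs i j hi hj _) j i hj hi _

theorem pvShape_foldl {PL : List (List Int)} {n : Nat}
    (hPL : ∀ l ∈ PL, ∃ i j : Nat, l = [(i:Int),(j:Int)] ∧ i < n ∧ j < n)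
    {m : List (List String)} (hs : pvShape m n) :
    pvShape (PL.foldl pvMark m) n := by
  induction PL generalizing m with
  | nil => exact hs
  | cons l t ih =>
    exact ih (fun x hx => hPL x (List.mem_cons_of_mem _ hx))
      (pvShape_mark hs (hPL l (List.mem_cons_self)))

theorem pvGet2_foldl_mark {PL : List (List Int)} {n : Nat}
    (hPL : ∀ l ∈ PL, ∃ i j : Nat, l = [(i:Int),(j:Int)] ∧ i < n ∧ j < n)
    {m : List (List String)} (hs : pvShape m n) (a b : Nat) :
    pvGet2 (PL.foldl pvMark m) a b
      = if pvHitP PL a b then "COREF" else pvGet2 m a b := by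
  induction PL generalizing m with
  | nil => simp [pvHitP]
  | cons l t ih =>
    obtain ⟨i, j, rfl, hi, hj⟩ := hPL l (List.mem_cons_self)
    have hs' : pvShape (pvMark m [(i:Int),(j:Int)]) n :=
      pvShape_mark hs ⟨i, j, rfl, hi, hj⟩
    rw [List.foldl_cons, ih (fun x hx => hPL x (List.mem_cons_of_mem _ hx)) hs']
    have hm : pvGet2 (pvMark m [(i:Int),(j:Int)]) a b
        = if (a = i ∧ b = j) ∨ (a = j ∧ b = i) then "COREF" else pvGet2 m a b := by
      show pvGet2 (pvSet2 (pvSet2 m i j "COREF") j i "COREF") a b = _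
      rw [pvGet2_set2 (pvShape_set2 hs i j hi hj _) j i hj hi _ a b,
          pvGet2_set2 hs i j hi hj _ a b]
      by_cases h1 : a = j ∧ b = i <;> by_cases h2 : a = i ∧ b = j <;>
        simp [h1, h2]
    have hcons : pvHitP ([(i:Int),(j:Int)] :: t) a b
        ↔ ((a = i ∧ b = j) ∨ (a = j ∧ b = i)) ∨ pvHitP t a b := by
      simp only [pvHitP_iff, List.mem_cons]
      constructor
      · rintro ⟨x, hx | hx, hor⟩
        · subst hx
          rcases hor with h | h <;>
          · simp only [List.cons.injEq, Int.natCast_inj, and_true] at h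
            omega
        · exact Or.inr ⟨x, hx, hor⟩
      · rintro (h | ⟨x, hx, hor⟩)
        · refine ⟨[(i:Int),(j:Int)], Or.inl rfl, ?_⟩
          rcases h with ⟨rfl, rfl⟩ | ⟨rfl, rfl⟩
          · exact Or.inl rfl
          · exact Or.inr rfl
        · exact ⟨x, Or.inr hx, hor⟩
    rw [hm]
    by_cases ht : pvHitP t a b <;> by_cases hh : (a = i ∧ b = j) ∨ (a = j ∧ b = i) <;>
      simp [ht, hh, hcons]

theorem mem_pvGroup {entities : List (List (String × String))} {c : String} {x : Int} :
    x ∈ pvGroup entities c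
      ↔ ∃ (a : Nat) (h : a < entities.length), x = (a:Int) ∧ pvCidA entities[a] = c := by
  simp only [pvGroup, List.mem_map, List.mem_filter, PySem.List.mem_enumerate_iff]
  constructor
  · rintro ⟨p, ⟨⟨k, hk, rfl⟩, hc⟩, rfl⟩
    exact ⟨k, hk, by simp, by simpa using hc⟩
  · rintro ⟨a, h, rfl, hc⟩
    exact ⟨((a:Int), entities[a]), ⟨⟨a, h, by simp⟩, by simpa using hc⟩, rfl⟩

theorem pairwise_pvGroup (entities : List (List (String × String))) (c : String) :
    (pvGroup entities c).Pairwise (· < ·) := by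
  have h1 : ((PySem.List.enumerate entities 0).filter
      (fun p => pvCidA p.2 == c)).Pairwise (fun p q => p.1 < q.1) :=
    (PySem.List.pairwise_lt_enumerate entities 0).sublist List.filter_sublist
  exact List.pairwise_map.mpr h1

theorem pair_sublist_of_mem {g : List Int} (hg : g.Pairwise (· < ·)) {x y : Int}
    (hx : x ∈ g) (hy : y ∈ g) (hxy : x < y) : [x, y].Sublist g := by
  induction g with
  | nil => cases hx
  | cons h t ih =>
    rcases List.mem_cons.mp hx with rfl | hxt
    · rcases List.mem_cons.mp hy with rfl | hyt
      · omega
      · exact List.Sublist.cons₂ _ (List.singleton_sublist.mpr hyt)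
    · rcases List.mem_cons.mp hy with rfl | hyt
      · have := (List.pairwise_cons.mp hg).1 x hxt
        omega
      · exact List.Sublist.cons _ (ih (List.pairwise_cons.mp hg).2 hxt hyt)

theorem pvPL_wf (entities : List (List (String × String))) :
    ∀ l ∈ pvPL entities, ∃ i j : Nat,
      l = [(i:Int),(j:Int)] ∧ i < entities.length ∧ j < entities.length := by
  intro l hl
  rw [pvPL, List.mem_flatMap] at hl
  obtain ⟨c, _, hlc⟩ := hl
  obtain ⟨hsub, hlen⟩ := (PySem.List.mem_combinations_iff _ _ _).mp hlc
  match l, hlen with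
  | [x, y], _ =>
    have hx : x ∈ pvGroup entities c := hsub.subset (by simp)
    have hy : y ∈ pvGroup entities c := hsub.subset (by simp)
    obtain ⟨i, hi, rfl, -⟩ := mem_pvGroup.mp hx
    obtain ⟨j, hj, rfl, -⟩ := mem_pvGroup.mp hy
    exact ⟨i, j, rfl, hi, hj⟩

theorem mem_pvKeys {entities : List (List (String × String))} {c : String} :
    c ∈ pvKeys entities ↔ ∃ (a : Nat) (h : a < entities.length), pvCidA entities[a] = c := by
  simp only [pvKeys, PySem.Set.mem_ofList, List.mem_map, PySem.List.mem_enumerate_iff]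
  constructor
  · rintro ⟨p, ⟨k, hk, rfl⟩, rfl⟩
    exact ⟨k, hk, rfl⟩
  · rintro ⟨a, h, rfl⟩
    exact ⟨((a:Int), entities[a]), ⟨a, h, by simp⟩, rfl⟩

theorem pvHit_iff (entities : List (List (String × String))) (a b : Nat)
    (ha : a < entities.length) (hb : b < entities.length) :
    pvHitP (pvPL entities) a b ↔ a ≠ b ∧ pvCidA entities[a] = pvCidA entities[b] := by
  rw [pvHitP_iff]
  constructor
  · rintro ⟨l, hl, hor⟩
    rw [pvPL, List.mem_flatMap] at hl
    obtain ⟨c, _, hlc⟩ := hl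
    obtain ⟨hsub, hlen⟩ := (PySem.List.mem_combinations_iff _ _ _).mp hlc
    have hpw := pairwise_pvGroup entities c
    have hxy : ∀ x y : Int, l = [x, y] → x < y ∧ x ∈ pvGroup entities c ∧ y ∈ pvGroup entities c := by
      rintro x y rfl
      refine ⟨?_, hsub.subset (by simp), hsub.subset (by simp)⟩
      have := hpw.sublist hsub
      simpa using this
    rcases hor with rfl | rfl
    · obtain ⟨hlt, hx, hy⟩ := hxy _ _ rfl
      obtain ⟨a', ha', hae, hca⟩ := mem_pvGroup.mp hx
      obtain ⟨b', hb', hbe, hcb⟩ := mem_pvGroup.mp hy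
      have : a' = a := by exact_mod_cast hae.symm
      subst this
      have : b' = b := by exact_mod_cast hbe.symm
      subst this
      exact ⟨by omega, by rw [hca, hcb]⟩
    · obtain ⟨hlt, hx, hy⟩ := hxy _ _ rfl
      obtain ⟨b', hb', hbe, hcb⟩ := mem_pvGroup.mp hx
      obtain ⟨a', ha', hae, hca⟩ := mem_pvGroup.mp hy
      have : a' = a := by exact_mod_cast hae.symm
      subst this
      have : b' = b := by exact_mod_cast hbe.symm
      subst this
      exact ⟨by omega, by rw [hca, hcb]⟩
  · rintro ⟨hne, hcc⟩
    set c := pvCidA entities[b] with hc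
    have hck : c ∈ pvKeys entities := mem_pvKeys.mpr ⟨b, hb, rfl⟩
    have hma : (a:Int) ∈ pvGroup entities c := mem_pvGroup.mpr ⟨a, ha, rfl, hcc⟩
    have hmb : (b:Int) ∈ pvGroup entities c := mem_pvGroup.mpr ⟨b, hb, rfl, rfl⟩
    have hpw := pairwise_pvGroup entities c
    rcases Nat.lt_or_gt_of_ne hne with h | h
    · refine ⟨[(a:Int),(b:Int)], ?_, Or.inl rfl⟩
      rw [pvPL, List.mem_flatMap]
      exact ⟨c, hck, (PySem.List.mem_combinations_iff _ _ _).mpr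
        ⟨pair_sublist_of_mem hpw hma hmb (by exact_mod_cast h), rfl⟩⟩
    · refine ⟨[(b:Int),(a:Int)], ?_, Or.inr rfl⟩
      rw [pvPL, List.mem_flatMap]
      exact ⟨c, hck, (PySem.List.mem_combinations_iff _ _ _).mpr
        ⟨pair_sublist_of_mem hpw hmb hma (by exact_mod_cast h), rfl⟩⟩

theorem pvGet2_eq {m : List (List String)} {a b : Nat} (ha : a < m.length)
    (hb : b < m[a].length) : pvGet2 m a b = m[a][b] := by
  simp [pvGet2, List.getElem?_eq_getElem, ha, hb]

theorem pvShape_replicate (n : Nat) :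
    pvShape (List.replicate n (List.replicate n "O")) n := by
  refine ⟨by simp, fun r hr => ?_⟩
  rw [List.eq_of_mem_replicate hr]
  simp

theorem A_eq_specM (entities : List (List (String × String))) :
    get_coref_types entities = pvSpecM (entities.map pvCidA) := by
  rw [A_eq_fold]
  have hwf := pvPL_wf entities
  have hs0 := pvShape_replicate entities.length
  have hs := pvShape_foldl hwf hs0
  apply List.ext_getElem
  · simp [pvSpecM, hs.1]
  · intro a ha ha'
    have han : a < entities.length := by rw [← hs.1]; exact ha
    apply List.ext_getElem
    · have := hs.2 _ (List.getElem_mem ha)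
      simp [pvSpecM, this]
    · intro b hb hb'
      have hbn : b < entities.length := by
        have := hs.2 _ (List.getElem_mem ha); omega
      rw [← pvGet2_eq ha hb]
      rw [pvGet2_foldl_mark hwf hs0 a b]
      have hO : pvGet2 (List.replicate entities.length (List.replicate entities.length "O")) a b = "O" := by
        simp [pvGet2, List.getElem?_eq_getElem, List.length_replicate, han, hbn,
          List.getElem_replicate]
      rw [hO]
      simp only [pvSpecM, List.getElem_map, List.getElem_range]
      have hga : (entities.map pvCidA)[a]? = some (pvCidA entities[a]) := by
        simp [List.getElem?_map, List.getElem?_eq_getElem, han]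
      have hgb : (entities.map pvCidA)[b]? = some (pvCidA entities[b]) := by
        simp [List.getElem?_map, List.getElem?_eq_getElem, hbn]
      rw [hga, hgb]
      by_cases hcond : a ≠ b ∧ pvCidA entities[a] = pvCidA entities[b]
      · rw [if_pos ((pvHit_iff entities a b han hbn).mpr hcond),
            if_pos (by exact ⟨hcond.1, by rw [hcond.2]⟩)]
      · rw [if_neg (fun h => hcond ((pvHit_iff entities a b han hbn).mp h)),
            if_neg (fun h => hcond ⟨h.1, Option.some_inj.mp h.2⟩)]

theorem B_eq_specM (entities : List (List (String × String))) :
    get_coref_types_alt entities = pvSpecM (entities.map pvCidA) := by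
  show (PySem.List.pyRange 0 (PySem.List.len (entities.map pvCidB)) 1).map _ = _
  rw [pvCidB_eq_pvCidA]
  set cids := entities.map pvCidA with hcids
  have hlen : PySem.List.len cids = (cids.length : Int) := by simp
  rw [hlen, PySem.List.pyRange_one]
  apply List.ext_getElem
  · simp [pvSpecM]
  · intro a ha ha'
    have han : a < cids.length := by simpa using ha
    simp only [List.getElem_map, List.getElem_range, pvSpecM]
    apply List.ext_getElem
    · simp
    · intro b hb hb'
      have hbn : b < cids.length := by simpa using hb
      simp only [List.getElem_map, List.getElem_range]
      have h1 : ((cids.length : Int) - 0).toNat = cids.length := by omega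
      have hga : PySem.List.pyGetD cids ((0:Int) + (a:Int)) "" = cids[a] := by
        rw [zero_add, PySem.List.pyGetD_natCast]
        exact List.getD_eq_getElem _ _ han
      have hgb : PySem.List.pyGetD cids ((0:Int) + (b:Int)) "" = cids[b] := by
        rw [zero_add, PySem.List.pyGetD_natCast]
        exact List.getD_eq_getElem _ _ hbn
      rw [hga, hgb]
      have hab : ((0:Int) + (a:Int) ≠ (0:Int) + (b:Int)) ↔ (a ≠ b) := by
        constructor <;> intro h <;> intro he <;> apply h <;> omega
      have hob : (cids[a]? = cids[b]?) ↔ (cids[a] = cids[b]) := by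
        rw [List.getElem?_eq_getElem han, List.getElem?_eq_getElem hbn, Option.some_inj]
      by_cases hc : a ≠ b ∧ cids[a] = cids[b]
      · rw [if_pos ⟨hab.mpr hc.1, hc.2⟩, if_pos ⟨hc.1, hob.mpr hc.2⟩]
      · rw [if_neg (fun h => hc ⟨hab.mp h.1, h.2⟩), if_neg (fun h => hc ⟨h.1, hob.mp h.2⟩)]

-- ===== VERDICT (by name: the statement is the Claim_ definition above) =====
theorem get_coref_types_spec : Claim_equal_get_coref_types := by
  intro entities _ _
  unfold Spec_get_coref_types
  rw [A_eq_specM, B_eq_specM]
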